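-- pv_equiv track=rewrite | github.com/marino-mulo/fjalekryq | tools/wordle/auto_crossword.py | find_all_runs
-- ===== SOURCE A (Python) =====
-- def find_all_runs(grid, size):
--     """Find every H and V run of 2+ consecutive letters."""
--     runs = []
--     for r in range(size):
--         c = 0
--         while c < size:
--             if grid[r][c] != "X":
--                 s = ""
--                 while c < size and grid[r][c] != "X":
--                     s += grid[r][c]
--                     c += 1
--                 if len(s) >= 2:
--                     runs.append(s)
--             else:
--                 c += 1
--     for c in range(size):
--         r = 0
--         while r < size:
--             if grid[r][c] != "X":
--                 s = ""
--                 while r < size and grid[r][c] != "X":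
--                     s += grid[r][c]
--                     r += 1
--                 if len(s) >= 2:
--                     runs.append(s)
--             else:
--                 r += 1
--     return runs
-- ===== SOURCE B (Python) =====
-- def find_all_runs(grid, size):
--     """Find every H and V run of 2+ consecutive letters."""
--     runs = []
--     for r in range(size):
--         s = "".join(grid[r][c] for c in range(size))
--         runs += [t for t in s.split("X") if len(t) >= 2]
--     for c in range(size):
--         s = "".join(grid[r][c] for r in range(size))
--         runs += [t for t in s.split("X") if len(t) >= 2]
--     return runs
-- ===== Notes on version B (the rewrite author's own statement) =====
-- stated objective: idiomatic
-- what changed: Replaces A's hand-written index-walking while-loops that accumulate each run character by character with a string-processing formulation: join each row/column into one string, split it on the blank marker 'X', and keep the tokens of length >= 2.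
-- outside the precondition, e.g. on find_all_runs([['aX', 'b'], ['c', 'd']], 2): A returns ['aXb', 'cd', 'aXc', 'bd'], B returns ['cd', 'bd']
import Mathlib
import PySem

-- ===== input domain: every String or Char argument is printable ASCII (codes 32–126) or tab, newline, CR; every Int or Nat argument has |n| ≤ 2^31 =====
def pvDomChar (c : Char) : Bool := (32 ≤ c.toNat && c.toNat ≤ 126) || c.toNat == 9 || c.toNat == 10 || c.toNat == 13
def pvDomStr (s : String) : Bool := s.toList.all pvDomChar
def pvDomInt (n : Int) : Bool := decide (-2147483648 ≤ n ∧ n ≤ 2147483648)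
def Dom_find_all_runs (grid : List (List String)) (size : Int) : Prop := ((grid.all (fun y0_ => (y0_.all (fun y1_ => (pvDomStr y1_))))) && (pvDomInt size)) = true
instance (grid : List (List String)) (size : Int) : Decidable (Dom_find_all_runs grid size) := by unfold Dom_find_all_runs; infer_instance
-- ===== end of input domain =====

-- B replaces A's index-walking while-loops by join-the-line / split-on-"X" / keep
-- tokens of length ≥ 2 (objective: idiomatic); same return value on Pre_.

-- ===== PORT A =====
-- grid[r][c]; in-range under Pre_ (both ports access cells only at 0 ≤ r,c < size)
def pvCell (grid : List (List String)) (r c : Int) : String :=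
  PySem.List.pyGetD (PySem.List.pyGetD grid r []) c ""

-- inner while:  while c < size and grid[r][c] != "X": s += grid[r][c]; c += 1
-- fuel only makes the loop total; it is ≥ the number of remaining iterations.
def pvGatherA (size : Int) (cell : Int → String) : Nat → Int → String → String × Int
  | 0, i, s => (s, i)
  | fuel+1, i, s =>
    if i < size ∧ cell i ≠ "X" then pvGatherA size cell fuel (i+1) (s ++ cell i)
    else (s, i)

-- outer while:  while c < size: if grid[r][c] != "X": gather; maybe append; else c += 1
def pvScanA (size : Int) (cell : Int → String) : Nat → Int → List String → List String
  | 0, _, runs => runs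
  | fuel+1, i, runs =>
    if i < size then
      if cell i ≠ "X" then
        let p := pvGatherA size cell (fuel+1) i ""
        pvScanA size cell fuel p.2 (if 2 ≤ PySem.Str.len p.1 then runs ++ [p.1] else runs)
      else pvScanA size cell fuel (i+1) runs
    else runs

def find_all_runs (grid : List (List String)) (size : Int) : List String :=
  let runs1 := (PySem.List.pyRange 0 size 1).foldl
      (fun runs r => pvScanA size (fun c => pvCell grid r c) (size.toNat + 1) 0 runs) []
  (PySem.List.pyRange 0 size 1).foldl
      (fun runs c => pvScanA size (fun r => pvCell grid r c) (size.toNat + 1) 0 runs) runs1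

-- ===== PORT B =====
-- [t for t in s.split("X") if len(t) >= 2]; s.split("X") is the sep ≠ "" split,
-- PySem.Chars.splitOn on the code points (exact), mapped back to String.
def pvTokensOf (s : String) : List String :=
  ((PySem.Chars.splitOn s.toList ['X']).map String.ofList).filter
    (fun t => 2 ≤ PySem.Str.len t)

def find_all_runs_alt (grid : List (List String)) (size : Int) : List String :=
  let runs1 := (PySem.List.pyRange 0 size 1).foldl (fun runs r =>
      runs ++ pvTokensOf (PySem.Str.join ""
        ((PySem.List.pyRange 0 size 1).map (fun c => pvCell grid r c)))) []
  (PySem.List.pyRange 0 size 1).foldl (fun runs c =>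
      runs ++ pvTokensOf (PySem.Str.join ""
        ((PySem.List.pyRange 0 size 1).map (fun r => pvCell grid r c)))) runs1

-- ===== PRECONDITION & SPEC =====
-- Pre_ excludes (a) the inputs where Python A raises IndexError (fewer than size rows,
-- or a row/cell window too short) and (b) grids whose size×size window has a cell that
-- contains 'X' inside a longer string (e.g. "aX"): outside the crossword domain of
-- single-letter cells, A's per-cell comparison and B's character-level split both act
-- defensibly but differently there.
def Pre_find_all_runs (grid : List (List String)) (size : Int) : Prop :=
  size ≤ (grid.length : Int) ∧
  ∀ row ∈ grid.take size.toNat, size ≤ (row.length : Int) ∧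
    ∀ cell ∈ row.take size.toNat, cell = "X" ∨ 'X' ∉ cell.toList
instance (grid : List (List String)) (size : Int) : Decidable (Pre_find_all_runs grid size) := by
  unfold Pre_find_all_runs; infer_instance

def pvWitness_find_all_runs : List (List String) × Int := ([["a", "b"], ["X", "c"]], 2)

def Spec_find_all_runs (grid : List (List String)) (size : Int) (out : List String) : Prop := out = find_all_runs_alt grid size
instance (grid : List (List String)) (size : Int) (out : List String) : Decidable (Spec_find_all_runs grid size out) := by unfold Spec_find_all_runs; infer_instance

-- ===== CLAIM (what is proved, stated in full; the proofs are below) =====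
def Claim_equal_find_all_runs : Prop := ∀ (grid : List (List String)) (size : Int), Dom_find_all_runs grid size → Pre_find_all_runs grid size → Spec_find_all_runs grid size (find_all_runs grid size)

-- ===== LEMMAS AND PROOFS =====

-- the runs contributed by one line, starting with accumulator cur (common spec of both loops)
def pvRunsFrom (cur : String) : List String → List String
  | [] => if 2 ≤ PySem.Str.len cur then [cur] else []
  | x :: xs =>
    if x = "X" then (if 2 ≤ PySem.Str.len cur then [cur] else []) ++ pvRunsFrom "" xs
    else pvRunsFrom (cur ++ x) xs

def pvConcat : List String → String
  | [] => ""
  | x :: xs => x ++ pvConcat xs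

def pvNonX (x : String) : Bool := decide (x ≠ "X")

-- the cells of one line from index i to size
def pvLineOf (size : Int) (cell : Int → String) (i : Int) : List String :=
  (PySem.List.pyRange i size 1).map cell

lemma pvNonX_true {x : String} (h : x ≠ "X") : pvNonX x = true := by simp [pvNonX, h]

lemma pvLineOf_nil (size : Int) (cell : Int → String) (i : Int) (h : size ≤ i) :
    pvLineOf size cell i = [] := by
  simp [pvLineOf, PySem.List.pyRange_one_eq_nil h]

lemma pvLineOf_cons (size : Int) (cell : Int → String) (i : Int) (h : i < size) :
    pvLineOf size cell i = cell i :: pvLineOf size cell (i + 1) := by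
  simp [pvLineOf, PySem.List.pyRange_one_cons h]

lemma pvGatherA_eq (size : Int) (cell : Int → String) :
    ∀ (fuel : Nat) (i : Int) (s : String), (size - i).toNat ≤ fuel →
    pvGatherA size cell fuel i s =
      (s ++ pvConcat ((pvLineOf size cell i).takeWhile pvNonX),
       i + ((pvLineOf size cell i).takeWhile pvNonX).length) := by
  intro fuel
  induction fuel with
  | zero =>
    intro i s h
    rw [pvLineOf_nil size cell i (by omega)]
    simp [pvGatherA, pvConcat]
  | succ fuel ih =>
    intro i s h
    by_cases hi : i < size
    · by_cases hx : cell i = "X"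
      · have hstep : pvGatherA size cell (fuel + 1) i s = (s, i) := by
          simp [pvGatherA, hx]
        have htw : List.takeWhile pvNonX (pvLineOf size cell i) = [] := by
          rw [pvLineOf_cons size cell i hi, List.takeWhile_cons]
          simp [pvNonX, hx]
        rw [hstep, htw]
        simp [pvConcat]
      · have hstep : pvGatherA size cell (fuel + 1) i s =
            pvGatherA size cell fuel (i + 1) (s ++ cell i) := by
          simp [pvGatherA, hi, hx]
        have hcons : List.takeWhile pvNonX (pvLineOf size cell i) =
            cell i :: List.takeWhile pvNonX (pvLineOf size cell (i + 1)) := by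
          rw [pvLineOf_cons size cell i hi, List.takeWhile_cons, pvNonX_true hx]
          simp
        rw [hstep, ih (i + 1) (s ++ cell i) (by omega), hcons]
        simp only [pvConcat, List.length_cons, Prod.mk.injEq]
        exact ⟨by rw [String.append_assoc], by push_cast; ring⟩
    · rw [pvLineOf_nil size cell i (by omega)]
      simp [pvGatherA, hi, pvConcat]

lemma pvDropWhile_lineOf (size : Int) (cell : Int → String) :
    ∀ (k : Nat) (i : Int), (size - i).toNat = k →
    ((pvLineOf size cell i).dropWhile pvNonX =
       pvLineOf size cell (i + ((pvLineOf size cell i).takeWhile pvNonX).length)) ∧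
    (i + (((pvLineOf size cell i).takeWhile pvNonX).length : Int) < size →
       cell (i + ((pvLineOf size cell i).takeWhile pvNonX).length) = "X") := by
  intro k
  induction k with
  | zero =>
    intro i h
    rw [pvLineOf_nil size cell i (by omega)]
    simp only [List.dropWhile_nil, List.takeWhile_nil, List.length_nil, Nat.cast_zero, add_zero]
    exact ⟨(pvLineOf_nil size cell i (by omega)).symm, fun h' => absurd h' (by omega)⟩
  | succ k ih =>
    intro i h
    have hi : i < size := by omega
    rw [pvLineOf_cons size cell i hi, List.takeWhile_cons, List.dropWhile_cons]
    by_cases hx : cell i = "X"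
    · have hb : pvNonX (cell i) = false := by simp [pvNonX, hx]
      rw [hb]
      simp only [Bool.false_eq_true, if_false, List.length_nil, Nat.cast_zero, add_zero]
      exact ⟨(pvLineOf_cons size cell i hi).symm, fun _ => hx⟩
    · have hb : pvNonX (cell i) = true := pvNonX_true hx
      rw [hb]
      have ihh := ih (i + 1) (by omega)
      simp only [if_true, List.length_cons]
      have harith : i + (((pvLineOf size cell (i + 1)).takeWhile pvNonX).length + 1 : Nat) =
          (i + 1) + (((pvLineOf size cell (i + 1)).takeWhile pvNonX).length : Int) := by
        push_cast; ring
      constructor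
      · rw [harith, ihh.1]
      · intro hlt
        rw [harith] at hlt ⊢
        exact ihh.2 hlt

lemma pvRunsFrom_append_nonX (pre : List String) :
    ∀ (rest : List String) (cur : String), (∀ x ∈ pre, x ≠ "X") →
    pvRunsFrom cur (pre ++ rest) = pvRunsFrom (cur ++ pvConcat pre) rest := by
  induction pre with
  | nil => intro rest cur _; simp [pvConcat]
  | cons y ys ih =>
    intro rest cur h
    have hy : y ≠ "X" := h y (by simp)
    have hrf : pvRunsFrom cur (y :: (ys ++ rest)) = pvRunsFrom (cur ++ y) (ys ++ rest) := by
      simp [pvRunsFrom, hy]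
    rw [List.cons_append, hrf, ih rest (cur ++ y) (fun x hx => h x (by simp [hx]))]
    rw [pvConcat, ← String.append_assoc]

lemma pvRunsFrom_flush (s : String) (rest : List String)
    (h : rest = [] ∨ ∃ xs, rest = "X" :: xs) :
    pvRunsFrom s rest = (if 2 ≤ PySem.Str.len s then [s] else []) ++ pvRunsFrom "" rest := by
  rcases h with h | ⟨xs, h⟩ <;> subst h <;> simp [pvRunsFrom]

lemma pvScanA_eq (size : Int) (cell : Int → String) :
    ∀ (fuel : Nat) (i : Int) (runs : List String), (size - i).toNat < fuel →
    pvScanA size cell fuel i runs = runs ++ pvRunsFrom "" (pvLineOf size cell i) := by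
  intro fuel
  induction fuel with
  | zero => intro i runs h; omega
  | succ fuel ih =>
    intro i runs h
    by_cases hi : i < size
    · by_cases hx : cell i = "X"
      · rw [pvLineOf_cons size cell i hi]
        simp only [pvScanA, hi, if_true, hx, ne_eq, not_true_eq_false, if_false]
        rw [ih (i + 1) runs (by omega)]
        simp [pvRunsFrom]
      · have hg := pvGatherA_eq size cell (fuel + 1) i "" (by omega)
        set tw := (pvLineOf size cell i).takeWhile pvNonX with htw
        have htwpos : 0 < tw.length := by
          rw [htw, pvLineOf_cons size cell i hi, List.takeWhile_cons, pvNonX_true hx]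
          simp
        have hdw := pvDropWhile_lineOf size cell (size - i).toNat i rfl
        simp only [pvScanA, hi, if_true, hx, ne_eq, not_false_eq_true, if_true, hg]
        rw [ih (i + (tw.length : Int)) _ (by omega)]
        have hsplit : pvLineOf size cell i = tw ++ pvLineOf size cell (i + (tw.length : Int)) := by
          conv_lhs => rw [← List.takeWhile_append_dropWhile (p := pvNonX) (l := pvLineOf size cell i)]
          rw [hdw.1]
        have hmem : ∀ x ∈ tw, x ≠ "X" := by
          intro x hxmem
          have := List.mem_takeWhile_imp hxmem
          simpa [pvNonX] using this
        rw [hsplit, pvRunsFrom_append_nonX tw _ "" hmem]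
        have hrest : pvLineOf size cell (i + (tw.length : Int)) = [] ∨
            ∃ xs, pvLineOf size cell (i + (tw.length : Int)) = "X" :: xs := by
          by_cases hlt : i + (tw.length : Int) < size
          · exact Or.inr ⟨pvLineOf size cell (i + (tw.length : Int) + 1),
              by rw [pvLineOf_cons size cell _ hlt, hdw.2 hlt]⟩
          · exact Or.inl (pvLineOf_nil size cell _ (by omega))
        have hempty : ("" : String) ++ pvConcat tw = pvConcat tw := by simp
        rw [hempty, pvRunsFrom_flush (pvConcat tw) _ hrest]
        split <;> simp
    · rw [pvLineOf_nil size cell i (by omega)]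
      simp [pvScanA, hi, pvRunsFrom]

lemma pvFoldScan (size : Int) (L : List Int) (cellOf : Int → Int → String) (runs : List String) :
    L.foldl (fun runs v => pvScanA size (cellOf v) (size.toNat + 1) 0 runs) runs =
      runs ++ L.flatMap (fun v => pvRunsFrom "" (pvLineOf size (cellOf v) 0)) := by
  induction L generalizing runs with
  | nil => simp
  | cons v vs ih =>
    simp only [List.foldl_cons, List.flatMap_cons]
    rw [pvScanA_eq size (cellOf v) (size.toNat + 1) 0 runs (by omega), ih, List.append_assoc]

-- ---- B side: split-on-'X' characterized ----

def pvHeadMap (f : List Char → List Char) : List (List Char) → List (List Char)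
  | [] => []
  | t :: ts => f t :: ts

-- simple recursive spec of s.split("X") on code points
def pvSplitX : List Char → List (List Char)
  | [] => [[]]
  | c :: rest => if c = 'X' then [] :: pvSplitX rest
                 else pvHeadMap (fun t => c :: t) (pvSplitX rest)

lemma pvSplitX_ne_nil (l : List Char) : pvSplitX l ≠ [] := by
  induction l with
  | nil => simp [pvSplitX]
  | cons c rest ih =>
    by_cases hc : c = 'X'
    · simp [pvSplitX, hc]
    · rcases hne : pvSplitX rest with _ | ⟨t, ts⟩
      · exact absurd hne ih
      · rw [pvSplitX, if_neg hc, hne]; simp [pvHeadMap]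

lemma pvGo_eq :
    ∀ (fuel : Nat) (l cur : List Char) (acc : List (List Char)), l.length < fuel →
    PySem.Chars.splitOn.go ['X'] fuel l cur acc =
      acc.reverse ++ pvHeadMap (fun t => cur.reverse ++ t) (pvSplitX l) := by
  intro fuel
  induction fuel with
  | zero => intro l cur acc h; omega
  | succ fuel ih =>
    intro l cur acc h
    rcases l with _ | ⟨c, rest⟩
    · rw [PySem.Chars.splitOn.go.eq_def]
      simp [pvSplitX, pvHeadMap]
    · rw [PySem.Chars.splitOn.go.eq_def]
      by_cases hc : c = 'X'
      · have hpre : List.isPrefixOf ['X'] (c :: rest) = true := by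
          subst hc; simp [List.isPrefixOf]
        simp only [hpre, if_true]
        have : List.drop (List.length ['X']) (c :: rest) = rest := by simp
        rw [this, ih rest [] (cur.reverse :: acc) (by simpa using Nat.lt_of_succ_lt_succ h)]
        subst hc
        simp only [pvSplitX, if_true, pvHeadMap, List.reverse_cons, List.reverse_nil,
          List.nil_append, List.append_assoc]
        rcases hne : pvSplitX rest with _ | ⟨t, ts⟩
        · exact absurd hne (pvSplitX_ne_nil rest)
        · simp
      · have hpre : List.isPrefixOf ['X'] (c :: rest) = false := by
          simp [List.isPrefixOf]
          intro hx; exact absurd hx.symm hc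
        simp only [hpre, Bool.false_eq_true, if_false]
        rw [ih rest (c :: cur) acc (by simpa using Nat.lt_of_succ_lt_succ h)]
        rcases hne : pvSplitX rest with _ | ⟨t, ts⟩
        · exact absurd hne (pvSplitX_ne_nil rest)
        · simp [pvSplitX, hc, hne, pvHeadMap]

lemma pvSplitOn_eq (l : List Char) : PySem.Chars.splitOn l ['X'] = pvSplitX l := by
  have h := pvGo_eq (l.length + 1) l [] [] (by omega)
  rw [PySem.Chars.splitOn] at *
  rw [h]
  rcases hne : pvSplitX l with _ | ⟨t, ts⟩
  · exact absurd hne (pvSplitX_ne_nil l)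
  · simp [pvHeadMap]

lemma pvSplitX_append (a : List Char) :
    ∀ b, 'X' ∉ a → pvSplitX (a ++ b) = pvHeadMap (fun t => a ++ t) (pvSplitX b) := by
  induction a with
  | nil =>
    intro b _
    rcases hne : pvSplitX b with _ | ⟨t, ts⟩
    · exact absurd hne (pvSplitX_ne_nil b)
    · rw [List.nil_append, hne]; simp [pvHeadMap]
  | cons c cs ih =>
    intro b h
    have hc : c ≠ 'X' := by intro hc; exact h (by simp [hc])
    have hcs : 'X' ∉ cs := fun hm => h (by simp [hm])
    rw [List.cons_append, pvSplitX, if_neg hc, ih b hcs]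
    rcases hne : pvSplitX b with _ | ⟨t, ts⟩
    · exact absurd hne (pvSplitX_ne_nil b)
    · simp [pvHeadMap]

-- pvRunsFrom on the code-point level
def pvCharRuns (cur : List Char) : List (List Char) → List (List Char)
  | [] => if 2 ≤ cur.length then [cur] else []
  | x :: xs =>
    if x = ['X'] then (if 2 ≤ cur.length then [cur] else []) ++ pvCharRuns [] xs
    else pvCharRuns (cur ++ x) xs

lemma pvHeadMap_cons (f : List Char → List Char) (t : List Char) (ts : List (List Char)) :
    pvHeadMap f (t :: ts) = f t :: ts := rfl

lemma pvCharRuns_nil (cur : List Char) :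
    pvCharRuns cur [] = if 2 ≤ cur.length then [cur] else [] := rfl

lemma pvCharRuns_cons (cur x : List Char) (xs : List (List Char)) :
    pvCharRuns cur (x :: xs) =
      if x = ['X'] then (if 2 ≤ cur.length then [cur] else []) ++ pvCharRuns [] xs
      else pvCharRuns (cur ++ x) xs := rfl

lemma pvRunsFrom_nil (cur : String) :
    pvRunsFrom cur [] = if 2 ≤ PySem.Str.len cur then [cur] else [] := rfl

lemma pvRunsFrom_cons (cur x : String) (xs : List String) :
    pvRunsFrom cur (x :: xs) =
      if x = "X" then (if 2 ≤ PySem.Str.len cur then [cur] else []) ++ pvRunsFrom "" xs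
      else pvRunsFrom (cur ++ x) xs := rfl

lemma pvStrLen_toList (cur : String) : PySem.Str.len cur = cur.toList.length := by
  simp [PySem.Str.len_eq]

lemma pvEmptyToList : ("" : String).toList = ([] : List Char) := rfl

lemma pvFilter_splitX (L : List (List Char)) :
    ∀ cur, 'X' ∉ cur → (∀ x ∈ L, x = ['X'] ∨ 'X' ∉ x) →
    (pvSplitX (cur ++ L.flatten)).filter (fun t => 2 ≤ t.length) = pvCharRuns cur L := by
  induction L with
  | nil =>
    intro cur hcur _
    rw [List.flatten_nil, List.append_nil,
      show cur = cur ++ ([] : List Char) from (List.append_nil cur).symm,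
      pvSplitX_append cur [] (by simpa using hcur)]
    simp only [pvSplitX, pvHeadMap, List.append_nil, pvCharRuns]
    by_cases h2 : 2 ≤ cur.length <;> simp [List.filter, h2]
  | cons x xs ih =>
    intro cur hcur hall
    by_cases hx : x = ['X']
    · subst hx
      have : cur ++ (['X'] :: xs).flatten = cur ++ ('X' :: xs.flatten) := by simp
      rw [this, pvSplitX_append cur _ hcur]
      have hsx : pvSplitX ('X' :: xs.flatten) = [] :: pvSplitX xs.flatten := by
        simp [pvSplitX]
      rw [hsx]
      have hrec := ih [] (by simp) (fun y hy => hall y (by simp [hy]))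
      simp only [List.nil_append] at hrec
      rw [pvHeadMap_cons, pvCharRuns_cons, if_pos rfl, List.append_nil, List.filter_cons, hrec]
      by_cases h2 : 2 ≤ cur.length
      · rw [if_pos (by simpa using h2), if_pos h2, List.singleton_append]
      · rw [if_neg (by simpa using h2), if_neg h2, List.nil_append]
    · have hxfree : 'X' ∉ x := (hall x (by simp)).resolve_left hx
      have : cur ++ (x :: xs).flatten = (cur ++ x) ++ xs.flatten := by simp
      rw [this, ih (cur ++ x)
            (by intro hmem; rcases List.mem_append.mp hmem with hm | hm
                exacts [hcur hm, hxfree hm])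
            (fun y hy => hall y (by simp [hy]))]
      simp [pvCharRuns, hx]

lemma pvCharRuns_bridge (line : List String) :
    ∀ cur : String,
    (pvCharRuns cur.toList (line.map String.toList)).map String.ofList = pvRunsFrom cur line := by
  induction line with
  | nil =>
    intro cur
    rw [List.map_nil, pvCharRuns_nil, pvRunsFrom_nil, pvStrLen_toList]
    by_cases h2 : 2 ≤ cur.toList.length
    · rw [if_pos h2, if_pos (show (2:Int) ≤ (cur.toList.length : Int) by exact_mod_cast h2),
        List.map_cons, List.map_nil, String.ofList_toList]
    · rw [if_neg h2, if_neg (show ¬ (2:Int) ≤ (cur.toList.length : Int) by exact_mod_cast h2),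
        List.map_nil]
  | cons x xs ih =>
    intro cur
    rw [List.map_cons, pvCharRuns_cons, pvRunsFrom_cons]
    by_cases hx : x = "X"
    · have hxl : x.toList = ['X'] := by subst hx; rfl
      rw [if_pos hxl, if_pos hx, List.map_append, ← pvEmptyToList, ih ""]
      congr 1
      rw [pvStrLen_toList]
      by_cases h2 : 2 ≤ cur.toList.length
      · rw [if_pos h2, if_pos (show (2:Int) ≤ (cur.toList.length : Int) by exact_mod_cast h2),
          List.map_cons, List.map_nil, String.ofList_toList]
      · rw [if_neg h2, if_neg (show ¬ (2:Int) ≤ (cur.toList.length : Int) by exact_mod_cast h2),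
          List.map_nil]
    · have hxl : x.toList ≠ ['X'] := by
        intro h
        apply hx
        have h2 := congrArg String.ofList h
        rw [String.ofList_toList] at h2
        exact h2.trans rfl
      rw [if_neg hxl, if_neg hx, ← String.toList_append, ih (cur ++ x)]

lemma pvIntersperse_nil_flatten (xs : List (List Char)) :
    (List.intersperse [] xs).flatten = xs.flatten := by
  induction xs with
  | nil => simp
  | cons a l ih =>
    rcases l with _ | ⟨b, t⟩
    · simp
    · rw [List.intersperse_cons₂, List.flatten_cons, List.flatten_cons, List.flatten_cons,
        List.nil_append, ih, List.flatten_cons]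

lemma pvTokensOf_eq (line : List String)
    (h : ∀ x ∈ line, x = "X" ∨ 'X' ∉ x.toList) :
    pvTokensOf (PySem.Str.join "" line) = pvRunsFrom "" line := by
  have hjoin : (PySem.Str.join "" line).toList = (line.map String.toList).flatten := by
    rw [PySem.Str.join]
    simp [PySem.Chars.join, List.intercalate, pvIntersperse_nil_flatten]
  rw [pvTokensOf, hjoin, pvSplitOn_eq, List.filter_map]
  have hp : ((fun t => decide (2 ≤ PySem.Str.len t)) ∘ String.ofList) =
      (fun t : List Char => decide (2 ≤ t.length)) := by
    funext t
    simp [PySem.Str.len_eq]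
  rw [hp]
  have hflat : (line.map String.toList).flatten =
      ([] : List Char) ++ (line.map String.toList).flatten := by simp
  rw [hflat, pvFilter_splitX (line.map String.toList) [] (by simp)
        (by
          intro x hx
          rw [List.mem_map] at hx
          obtain ⟨s, hs, rfl⟩ := hx
          rcases h s hs with h1 | h1
          · left; subst h1; decide
          · right; exact h1)]
  have hnil : ("" : String).toList = ([] : List Char) := by decide
  rw [← hnil, pvCharRuns_bridge]

-- ---- Pre_ gives the cell condition on the window ----

lemma pvCell_ok (grid : List (List String)) (size : Int)
    (hpre : Pre_find_all_runs grid size) {r c : Int}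
    (hr0 : 0 ≤ r) (hr : r < size) (hc0 : 0 ≤ c) (hc : c < size) :
    pvCell grid r c = "X" ∨ 'X' ∉ (pvCell grid r c).toList := by
  obtain ⟨hlen, hrow⟩ := hpre
  have hrn : r = ((r.toNat : Nat) : Int) := by omega
  have hcn : c = ((c.toNat : Nat) : Int) := by omega
  have hrlt : r.toNat < grid.length := by omega
  have hrsz : r.toNat < size.toNat := by omega
  have hmemrow : grid[r.toNat] ∈ grid.take size.toNat := by
    have : (grid.take size.toNat)[r.toNat]'(by simp; omega) = grid[r.toNat] := by
      simp [List.getElem_take]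
    rw [← this]
    exact List.getElem_mem _
  obtain ⟨hrl, hcellcond⟩ := hrow _ hmemrow
  have hclt : c.toNat < (grid[r.toNat]).length := by omega
  have hcsz : c.toNat < size.toNat := by omega
  have hmemcell : (grid[r.toNat])[c.toNat] ∈ (grid[r.toNat]).take size.toNat := by
    have : ((grid[r.toNat]).take size.toNat)[c.toNat]'(by simp; omega) =
        (grid[r.toNat])[c.toNat] := by simp [List.getElem_take]
    rw [← this]
    exact List.getElem_mem _
  have hroweq : PySem.List.pyGetD grid r [] = grid[r.toNat] := by
    conv_lhs => rw [hrn]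
    rw [PySem.List.pyGetD_natCast, List.getD_eq_getElem _ _ hrlt]
  have hcell : pvCell grid r c = (grid[r.toNat])[c.toNat] := by
    rw [pvCell, hroweq]
    conv_lhs => rw [hcn]
    rw [PySem.List.pyGetD_natCast, List.getD_eq_getElem _ _ hclt]
  rw [hcell]
  exact hcellcond _ hmemcell

lemma pvFoldLinesB (size : Int) (L : List Int) (cellOf : Int → Int → String)
    (runs : List String)
    (h : ∀ v ∈ L, ∀ x ∈ (PySem.List.pyRange 0 size 1).map (cellOf v),
        x = "X" ∨ 'X' ∉ x.toList) :
    L.foldl (fun runs v =>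
        runs ++ pvTokensOf (PySem.Str.join "" ((PySem.List.pyRange 0 size 1).map (cellOf v)))) runs =
      runs ++ L.flatMap (fun v => pvRunsFrom "" (pvLineOf size (cellOf v) 0)) := by
  induction L generalizing runs with
  | nil => simp
  | cons v vs ih =>
    simp only [List.foldl_cons, List.flatMap_cons]
    rw [pvTokensOf_eq _ (h v (by simp)), ih _ (fun w hw => h w (by simp [hw])),
      List.append_assoc]
    rfl

-- ===== VERDICT (by name: the statement is the Claim_ definition above) =====
theorem find_all_runs_spec : Claim_equal_find_all_runs := by
  intro grid size _ hpre
  unfold Spec_find_all_runs find_all_runs find_all_runs_alt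
  have hcellsR : ∀ v ∈ PySem.List.pyRange 0 size 1,
      ∀ x ∈ (PySem.List.pyRange 0 size 1).map (fun c => pvCell grid v c),
      x = "X" ∨ 'X' ∉ x.toList := by
    intro v hv x hx
    rw [List.mem_map] at hx
    obtain ⟨c, hc, rfl⟩ := hx
    obtain ⟨hv1, hv2⟩ := PySem.List.mem_pyRange_one.mp hv
    obtain ⟨hc1, hc2⟩ := PySem.List.mem_pyRange_one.mp hc
    exact pvCell_ok grid size hpre hv1 hv2 hc1 hc2
  have hcellsC : ∀ v ∈ PySem.List.pyRange 0 size 1,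
      ∀ x ∈ (PySem.List.pyRange 0 size 1).map (fun r => pvCell grid r v),
      x = "X" ∨ 'X' ∉ x.toList := by
    intro v hv x hx
    rw [List.mem_map] at hx
    obtain ⟨r, hr, rfl⟩ := hx
    obtain ⟨hv1, hv2⟩ := PySem.List.mem_pyRange_one.mp hv
    obtain ⟨hr1, hr2⟩ := PySem.List.mem_pyRange_one.mp hr
    exact pvCell_ok grid size hpre hr1 hr2 hv1 hv2
  rw [pvFoldScan, pvFoldScan, pvFoldLinesB _ _ _ _ hcellsR, pvFoldLinesB _ _ _ _ hcellsC]
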